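-- pv_equiv track=rewrite | github.com/dnsmkl/pysql | lexer.py | eat_words
-- ===== SOURCE A (Python) =====
-- punctuation = ['==','<=','>=','<>','!=','||','=','<','>','(',')','/','*','-','+',',',';','?']
--
-- spacing = ' \n\t'
--
-- def eat_words(text):
--     nonwordchars = []
--     nonwordchars.extend(spacing)
--     nonwordchars.extend(map(lambda x: x[0], punctuation))
--
--     assert text[0] not in nonwordchars
--     for i, c in enumerate(text):
--         if c in nonwordchars: return text[0:i]
--     else:
--         return text
-- ===== SOURCE B (Python) =====
-- punctuation = ['==','<=','>=','<>','!=','||','=','<','>','(',')','/','*','-','+',',',';','?']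
--
-- spacing = ' \n\t'
--
-- def eat_words(text):
--     nonwordchars = []
--     nonwordchars.extend(spacing)
--     nonwordchars.extend(map(lambda x: x[0], punctuation))
--
--     assert text[0] not in nonwordchars
--     positions = [p for p in (text.find(c) for c in nonwordchars) if p != -1]
--     return text[:min(positions)] if positions else text
-- ===== Notes on version B (the rewrite author's own statement) =====
-- stated objective: faster
-- what changed: A scans text left to right testing each character for membership in the delimiter list; B instead loops over the delimiter set calling text.find(c) for each, collects the non-(-1) positions and slices the text at their minimum (full text if none found).
import Mathlib
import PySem

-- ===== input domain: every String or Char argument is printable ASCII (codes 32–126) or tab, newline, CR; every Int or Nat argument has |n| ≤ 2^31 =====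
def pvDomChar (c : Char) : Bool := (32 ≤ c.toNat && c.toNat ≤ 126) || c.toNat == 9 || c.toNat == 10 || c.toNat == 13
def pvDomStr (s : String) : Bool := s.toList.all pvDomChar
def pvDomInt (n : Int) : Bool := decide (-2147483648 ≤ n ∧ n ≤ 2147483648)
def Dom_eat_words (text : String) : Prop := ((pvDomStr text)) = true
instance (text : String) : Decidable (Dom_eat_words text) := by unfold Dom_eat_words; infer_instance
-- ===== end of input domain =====

-- B replaces A's per-character membership scan by min over str.find of each delimiter (measured constant-factor speedup); return value only.

-- nonwordchars = list(spacing) + [p[0] for p in punctuation]  (shared module constants, built the same way in A and B)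
def pvNonwordchars : List Char :=
  [' ', '\n', '\t'] ++
  (["==","<=",">=","<>","!=","||","=","<",">","(",")","/","*","-","+",",",";","?"].map
    (fun x => x.toList.headD ' '))   -- x[0] of each punctuation token (all nonempty literals)

-- ===== PORT A =====
-- for i, c in enumerate(text): if c in nonwordchars: return text[0:i]  -- else: return text
def eatWordsGo (text : String) (i : Nat) (rest : List Char) : String :=
  match rest with
  | [] => text
  | c :: rs =>
    if pvNonwordchars.contains c then String.mk (text.toList.take i)   -- text[0:i], i ≥ 0: slice = take
    else eatWordsGo text (i + 1) rs

def eat_words (text : String) : String :=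
  eatWordsGo text 0 text.toList

-- ===== PORT B =====
-- positions = [p for p in (text.find(c) for c in nonwordchars) if p != -1]
-- return text[:min(positions)] if positions else text
def eat_words_alt (text : String) : String :=
  let positions :=
    (pvNonwordchars.map (fun c => PySem.Chars.find text.toList [c])).filter (fun p => p ≠ -1)
  match PySem.List.min? positions (fun x => x) with
  | some m => String.mk (PySem.Chars.slice text.toList none (some m))   -- text[:m]
  | none => text

-- ===== PRECONDITION & SPEC =====
-- Pre_ excludes exactly where Python A raises: empty text (IndexError on text[0]) and text whose
-- first character is a delimiter (the assert fails); B keeps the same assert, so it raises there too.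
def Pre_eat_words (text : String) : Prop :=
  text.toList ≠ [] ∧ text.toList.headD ' ' ∉ pvNonwordchars
instance (text : String) : Decidable (Pre_eat_words text) := by unfold Pre_eat_words; infer_instance

def pvWitness_eat_words : String := "abc de"

def Spec_eat_words (text : String) (out : String) : Prop := out = eat_words_alt text
instance (text : String) (out : String) : Decidable (Spec_eat_words text out) := by unfold Spec_eat_words; infer_instance

-- ===== CLAIM (what is proved, stated in full; the proofs are below) =====
def Claim_equal_eat_words : Prop := ∀ (text : String), Dom_eat_words text → Pre_eat_words text → Spec_eat_words text (eat_words text)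

-- ===== LEMMAS AND PROOFS =====

-- singleton substring occurs at position i iff that character sits there
theorem pv_singleton_prefix {c : Char} {xs : List Char} : ([c] <+: xs) ↔ xs.head? = some c := by
  cases xs with
  | nil => simp
  | cons y ys => simp [List.cons_prefix_cons, eq_comm]

theorem pv_singleton_prefix_drop {c : Char} {l : List Char} {i : Nat} :
    ([c] <+: l.drop i) ↔ l[i]? = some c := by
  rw [pv_singleton_prefix, List.head?_drop]

-- A's loop, characterised by findIdx?
theorem pv_eatWordsGo_spec (text : String) : ∀ (suf : List Char) (i : Nat),
    eatWordsGo text i suf =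
      match suf.findIdx? (fun c => decide (c ∈ pvNonwordchars)) with
      | some j => String.mk (text.toList.take (i + j))
      | none => text := by
  intro suf
  induction suf with
  | nil => intro i; simp [eatWordsGo]
  | cons c rs ih =>
    intro i
    by_cases h : c ∈ pvNonwordchars
    · simp only [eatWordsGo, h, if_true, List.findIdx?_cons, decide_eq_true_eq]
      simp [h]
    · simp only [eatWordsGo, h, if_false, ih (i + 1), List.findIdx?_cons, decide_eq_true_eq]
      cases hfi : rs.findIdx? (fun c => decide (c ∈ pvNonwordchars)) with
      | none => simp; exact fun hc => absurd hc h
      | some j =>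
        simp [Nat.add_assoc, Nat.add_comm 1 j]
        exact fun hc => absurd hc h

-- find of a single delimiter: characterisation used on both sides
theorem pv_find_single_ge (l : List Char) (c : Char) (j : Nat)
    (hmin : ∀ i, i < j → (hi : i < l.length) → l[i] ∉ pvNonwordchars)
    (hc : c ∈ pvNonwordchars) (hne : PySem.Chars.find l [c] ≠ -1) :
    (j : Int) ≤ PySem.Chars.find l [c] := by
  have h0 : 0 ≤ PySem.Chars.find l [c] := by
    have := PySem.Chars.neg_one_le_find l [c]; omega
  obtain ⟨hpre, -⟩ := PySem.Chars.find_spec h0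
  have hget : l[(PySem.Chars.find l [c]).toNat]? = some c := pv_singleton_prefix_drop.mp hpre
  rw [List.getElem?_eq_some_iff] at hget
  obtain ⟨hlt, hval⟩ := hget
  by_contra hcon
  push Not at hcon
  have hj : (PySem.Chars.find l [c]).toNat < j := by omega
  exact hmin _ hj hlt (by rw [hval]; exact hc)

-- ===== VERDICT (by name: the statement is the Claim_ definition above) =====
theorem eat_words_spec : Claim_equal_eat_words := by
  intro text _ _
  unfold Spec_eat_words
  set l := text.toList with hl
  have hA := pv_eatWordsGo_spec text l 0
  unfold eat_words eat_words_alt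
  rw [← hl] at hA ⊢
  rw [hA]
  cases hfi : l.findIdx? (fun c => decide (c ∈ pvNonwordchars)) with
  | none =>
    have hnone : ∀ x ∈ l, x ∉ pvNonwordchars := by
      rw [List.findIdx?_eq_none_iff] at hfi
      intro x hx; simpa using hfi x hx
    have hpos : (pvNonwordchars.map (fun c => PySem.Chars.find l [c])).filter
        (fun p => !decide (p = -1)) = [] := by
      rw [List.filter_eq_nil_iff]
      intro a ha
      simp only [List.mem_map] at ha
      obtain ⟨c, hcnw, rfl⟩ := ha
      simp only [Bool.not_eq_eq_eq_not, Bool.not_true, decide_eq_false_iff_not, not_not]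
      rw [PySem.Chars.find_eq_neg_one_iff]
      intro hinf
      exact hnone c ((List.singleton_infix_iff c l).mp hinf) hcnw
    simp only [ne_eq, decide_not]
    rw [hpos]
    rfl
  | some j =>
    rw [List.findIdx?_eq_some_iff_getElem] at hfi
    obtain ⟨hj, hpj, hminj⟩ := hfi
    simp only [decide_eq_true_eq] at hpj hminj
    have hmin : ∀ i, i < j → (hi : i < l.length) → l[i] ∉ pvNonwordchars := by
      intro i hij hi; exact hminj i hij
    -- find l [l[j]] = j
    have hinf : [l[j]] <:+: l := (List.singleton_infix_iff l[j] l).mpr (l.getElem_mem hj)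
    have hne0 : PySem.Chars.find l [l[j]] ≠ -1 := by
      rw [ne_eq, PySem.Chars.find_eq_neg_one_iff]; exact not_not_intro hinf
    have h0 : 0 ≤ PySem.Chars.find l [l[j]] := by
      have := PySem.Chars.neg_one_le_find l [l[j]]; omega
    have hgej : (j : Int) ≤ PySem.Chars.find l [l[j]] := pv_find_single_ge l l[j] j hmin hpj hne0
    have hlej : PySem.Chars.find l [l[j]] ≤ (j : Int) := by
      obtain ⟨-, hmf⟩ := PySem.Chars.find_spec h0
      by_contra hcon
      push Not at hcon
      have hjlt : j < (PySem.Chars.find l [l[j]]).toNat := by omega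
      exact hmf j hjlt (pv_singleton_prefix_drop.mpr (List.getElem?_eq_getElem hj))
    have hfind0 : PySem.Chars.find l [l[j]] = (j : Int) := le_antisymm hlej hgej
    have hmem : (j : Int) ∈ (pvNonwordchars.map (fun c => PySem.Chars.find l [c])).filter
        (fun p => !decide (p = -1)) := by
      rw [List.mem_filter]
      refine ⟨List.mem_map.mpr ⟨l[j], hpj, hfind0⟩, by simp⟩
    have hge : ∀ p ∈ (pvNonwordchars.map (fun c => PySem.Chars.find l [c])).filter
        (fun p => !decide (p = -1)), (j : Int) ≤ p := by
      intro p hp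
      rw [List.mem_filter] at hp
      obtain ⟨hpm, hpne⟩ := hp
      obtain ⟨c, hcnw, rfl⟩ := List.mem_map.mp hpm
      exact pv_find_single_ge l c j hmin hcnw (by simpa using hpne)
    cases hm : PySem.List.min? ((pvNonwordchars.map (fun c => PySem.Chars.find l [c])).filter
        (fun p => !decide (p = -1))) (fun x => x) with
    | none =>
      rw [PySem.List.min?_eq_none_iff] at hm
      rw [hm] at hmem
      exact absurd hmem (List.not_mem_nil)
    | some m =>
      have hmemb := PySem.List.min?_mem hm
      have hmle : m ≤ (j : Int) := PySem.List.min?_isMin hm _ hmem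
      have hjlem : (j : Int) ≤ m := hge m hmemb
      have hmj : m = (j : Int) := le_antisymm hmle hjlem
      simp only [ne_eq, decide_not, Nat.zero_add]
      rw [hm, hmj]
      simp [pysem]
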